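-- pv_equiv track=rewrite | github.com/mayerli23/solution.py | solution.py | difuminado
-- ===== SOURCE A (Python) =====
-- def difuminado(lista_3d):
--     result = [row.copy() for row in lista_3d]
--     # SU SOLUCIÓN EMPIEZA AQUÍ
--
--     result=[]
--     for gi in range(len(lista_3d)):
--         fila = []
--         for letra in range(len(lista_3d[gi])):
--             if (letra==0):
--                 tic=[lista_3d[gi][letra][0],lista_3d[gi][letra][1],lista_3d[gi][letra][2]]
--                 fila.append(tic)
--             elif (letra==1):
--                 tic=[(lista_3d[gi][letra][0]+lista_3d[gi][letra-1][0])//2,(lista_3d[gi][letra][1]+lista_3d[gi][letra-1][1])//2,(lista_3d[gi][letra][2]+lista_3d[gi][letra-1][2])//2]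
--                 fila.append(tic)
--             else:
--                 tic=[(lista_3d[gi][letra][0]+lista_3d[gi][letra-1][0]+lista_3d[gi][letra-2][0])//3,(lista_3d[gi][letra][1]+lista_3d[gi][letra-1][1]+lista_3d[gi][letra-2][1])//3,(lista_3d[gi][letra][2]+lista_3d[gi][letra-1][2]+lista_3d[gi][letra-2][2])//3]
--                 fila.append(tic)
--
--         result.append(fila)
--
--
--     # SU SOLUCIÓN TERMINA AQUÍ
--     return result
-- ===== SOURCE B (Python) =====
-- def difuminado(lista_3d):
--     result = []
--     for row in lista_3d:
--         fila = []
--         window = []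
--         for p in row:
--             window = (window + [[p[0], p[1], p[2]]])[-3:]
--             n = len(window)
--             fila.append([sum(q[c] for q in window) // n for c in range(3)])
--         result.append(fila)
--     return result
-- ===== Notes on version B (the rewrite author's own statement) =====
-- stated objective: simpler
-- what changed: Replaced the three duplicated index-case branches (letra==0/1/else with nine explicit row[letra-k][c] lookups) by a single uniform pass that carries a sliding window of the last up-to-3 pixels and emits the integer average of the window, so the loop body is one expression instead of three near-identical branches.
import Mathlib
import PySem

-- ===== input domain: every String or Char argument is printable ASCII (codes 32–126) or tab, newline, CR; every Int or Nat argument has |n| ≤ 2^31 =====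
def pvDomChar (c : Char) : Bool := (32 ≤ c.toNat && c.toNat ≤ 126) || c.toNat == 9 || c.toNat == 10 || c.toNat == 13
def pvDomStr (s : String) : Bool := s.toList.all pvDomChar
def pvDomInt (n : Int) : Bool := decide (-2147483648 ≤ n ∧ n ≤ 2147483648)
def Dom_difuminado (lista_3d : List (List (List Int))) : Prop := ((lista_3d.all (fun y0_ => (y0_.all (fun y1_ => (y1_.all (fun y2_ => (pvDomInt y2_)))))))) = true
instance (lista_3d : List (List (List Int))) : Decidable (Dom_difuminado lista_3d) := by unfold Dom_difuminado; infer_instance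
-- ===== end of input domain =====

-- B replaces A's three explicit index cases (letra = 0 / 1 / else, each re-indexing the row three
-- times per channel) by a single pass that carries a sliding window of the last ≤ 3 pixels and
-- averages it uniformly; objective: simpler (one uniform loop body instead of three duplicated branches).


-- ===== PORT A =====
-- lista_3d[gi][letra][c] with all indices in range under Pre_; pyGetD is exact there
def pixA (row : List (List Int)) (i c : Int) : Int :=
  PySem.List.pyGetD (PySem.List.pyGetD row i ([] : List Int)) c 0

def difuminado (lista_3d : List (List (List Int))) : List (List (List Int)) :=
  (PySem.List.pyRange 0 lista_3d.length 1).map (fun gi =>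
    let row := PySem.List.pyGetD lista_3d gi ([] : List (List Int))
    (PySem.List.pyRange 0 row.length 1).map (fun letra =>
      if letra = 0 then
        [pixA row letra 0, pixA row letra 1, pixA row letra 2]
      else if letra = 1 then
        [PySem.Int.floordiv (pixA row letra 0 + pixA row (letra - 1) 0) 2,
         PySem.Int.floordiv (pixA row letra 1 + pixA row (letra - 1) 1) 2,
         PySem.Int.floordiv (pixA row letra 2 + pixA row (letra - 1) 2) 2]
      else
        [PySem.Int.floordiv (pixA row letra 0 + pixA row (letra - 1) 0 + pixA row (letra - 2) 0) 3,
         PySem.Int.floordiv (pixA row letra 1 + pixA row (letra - 1) 1 + pixA row (letra - 2) 1) 3,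
         PySem.Int.floordiv (pixA row letra 2 + pixA row (letra - 1) 2 + pixA row (letra - 2) 2) 3]))

-- ===== PORT B =====
-- [p[0], p[1], p[2]]
def tr3 (p : List Int) : List Int :=
  [PySem.List.pyGetD p 0 0, PySem.List.pyGetD p 1 0, PySem.List.pyGetD p 2 0]

-- [sum(q[c] for q in window) // n for c in range(3)]
def blurPix (w : List (List Int)) : List Int :=
  (PySem.List.pyRange 0 3 1).map (fun c =>
    PySem.Int.floordiv (w.foldl (fun s q => s + PySem.List.pyGetD q c 0) 0) (w.length))

-- the inner loop: window = (window + [[p[0],p[1],p[2]]])[-3:]; emit the window average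
def blurRow : List (List Int) → List (List Int) → List (List Int)
  | _, [] => []
  | w, p :: rest =>
      let w' := (w ++ [tr3 p]).drop ((w.length + 1) - 3)
      blurPix w' :: blurRow w' rest

def difuminado_alt (lista_3d : List (List (List Int))) : List (List (List Int)) :=
  lista_3d.map (fun row => blurRow [] row)

-- ===== PRECONDITION & SPEC =====
-- Pre_: every pixel has at least 3 channels — on a shorter pixel both Pythons raise IndexError.
def Pre_difuminado (lista_3d : List (List (List Int))) : Prop :=
  ∀ row ∈ lista_3d, ∀ p ∈ row, 3 ≤ p.length
instance (lista_3d : List (List (List Int))) : Decidable (Pre_difuminado lista_3d) := by unfold Pre_difuminado; infer_instance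
def pvWitness_difuminado : List (List (List Int)) := [[[1, 2, 3], [4, 5, 6], [7, 8, 9]], [[10, 11, 12]]]

def Spec_difuminado (lista_3d : List (List (List Int))) (out : List (List (List Int))) : Prop := out = difuminado_alt lista_3d
instance (lista_3d : List (List (List Int))) (out : List (List (List Int))) : Decidable (Spec_difuminado lista_3d out) := by unfold Spec_difuminado; infer_instance

-- ===== CLAIM (what is proved, stated in full; the proofs are below) =====
def Claim_equal_difuminado : Prop := ∀ (lista_3d : List (List (List Int))), Dom_difuminado lista_3d → Pre_difuminado lista_3d → Spec_difuminado lista_3d (difuminado lista_3d)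

-- ===== LEMMAS AND PROOFS =====

-- A's row body at a Nat index
def chN (row : List (List Int)) (i : Nat) (c : Int) : Int :=
  PySem.List.pyGetD (row.getD i []) c 0

def gRow (row : List (List Int)) (i : Nat) : List Int :=
  if i = 0 then [chN row 0 0, chN row 0 1, chN row 0 2]
  else if i = 1 then
    [PySem.Int.floordiv (chN row 1 0 + chN row 0 0) 2,
     PySem.Int.floordiv (chN row 1 1 + chN row 0 1) 2,
     PySem.Int.floordiv (chN row 1 2 + chN row 0 2) 2]
  else
    [PySem.Int.floordiv (chN row i 0 + chN row (i-1) 0 + chN row (i-2) 0) 3,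
     PySem.Int.floordiv (chN row i 1 + chN row (i-1) 1 + chN row (i-2) 1) 3,
     PySem.Int.floordiv (chN row i 2 + chN row (i-1) 2 + chN row (i-2) 2) 3]

theorem map_range_getD {α β : Type} (xs : List α) (d : α) (F : α → β) :
    (List.range xs.length).map (fun i => F (xs.getD i d)) = xs.map F := by
  induction xs with
  | nil => rfl
  | cons x xs ih =>
    simp [List.range_succ_eq_map, List.map_map]
    exact ih

theorem A_eq_map (L : List (List (List Int))) :
    difuminado L = L.map (fun row => (List.range row.length).map (gRow row)) := by
  unfold difuminado
  rw [PySem.List.pyRange_zero_nat, List.map_map,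
      ← map_range_getD L [] (fun row => (List.range row.length).map (gRow row))]
  apply List.map_congr_left
  intro i _
  simp only [Function.comp, PySem.List.pyGetD_natCast]
  set row := L.getD i [] with hrow
  rw [PySem.List.pyRange_zero_nat, List.map_map]
  apply List.map_congr_left
  intro j _
  simp only [Function.comp]
  by_cases h0 : j = 0
  · subst h0; simp [gRow, pixA, chN, PySem.List.pyGetD_ofNat', List.getD]
  · by_cases h1 : j = 1
    · subst h1
      simp [gRow, pixA, chN, PySem.List.pyGetD_ofNat', List.getD]
    · have e1 : ((j:Nat):Int) - 1 = ((j-1:Nat):Int) := by omega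
      have e2 : ((j:Nat):Int) - 2 = ((j-2:Nat):Int) := by omega
      have c1 : ((j:Nat):Int) ≠ 1 := by omega
      simp [gRow, pixA, chN, h0, h1, c1, e1, e2, PySem.List.pyGetD_natCast,
            PySem.List.pyGetD_ofNat', List.getD]

theorem drop_win {α : Type} (l : List α) (t : α) :
    ((l.drop (l.length - 3)) ++ [t]).drop ((l.drop (l.length - 3)).length + 1 - 3)
      = (l ++ [t]).drop ((l.length + 1) - 3) := by
  rw [List.drop_append_of_le_length (by simp only [List.length_drop]; omega),
      List.drop_append_of_le_length (by omega),
      List.drop_drop]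
  congr 2
  simp only [List.length_drop]
  omega

theorem win_three {α : Type} (done : List α) (p : α) (d : α) (h : 2 ≤ done.length) :
    ((done ++ [p]).drop ((done.length + 1) - 3))
      = [done.getD (done.length - 2) d, done.getD (done.length - 1) d, p] := by
  apply List.ext_getElem
  · simp; omega
  · intro j hj _
    rw [List.getElem_drop]
    have hj3 : j < 3 := by simp at hj; omega
    interval_cases j
    · rw [List.getElem_append_left (by omega), List.getD_eq_getElem done d (by omega)]
      simp only [List.getElem_cons_zero]
      simp only [show done.length + 1 - 3 + 0 = done.length - 2 from by omega]
    · rw [List.getElem_append_left (by omega),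
          @List.getD_eq_getElem _ done d (done.length - 1) (by omega)]
      simp only [List.getElem_cons_succ, List.getElem_cons_zero,
        show done.length + 1 - 3 + 1 = done.length - 1 from by omega]
    · rw [List.getElem_append_right (by omega)]
      simp

theorem head_eq_big (done : List (List Int)) (p : List Int) (rest : List (List Int))
    (h : 2 ≤ done.length) :
    blurPix (((done ++ [p]).map tr3).drop ((done.length + 1) - 3))
      = gRow (done ++ p :: rest) done.length := by
  have pyR3 : PySem.List.pyRange 0 3 1 = [0,1,2] := by decide
  have hmap : (done ++ [p]).map tr3 = done.map tr3 ++ [tr3 p] := by simp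
  have hwin := win_three (done.map tr3) (tr3 p) [] (by simpa using h)
  rw [hmap, show done.length = (done.map tr3).length from by simp, hwin]
  have g2 : ∀ j : Nat, j < done.length →
      (done.map tr3).getD j [] = tr3 (done.getD j []) := by
    intro j hj
    rw [List.getD_eq_getElem _ _ (by simpa using hj), List.getD_eq_getElem _ _ hj, List.getElem_map]
  have hk : ¬((done.map tr3).length = 0) := by simp only [List.length_map]; omega
  have hk1 : ¬((done.map tr3).length = 1) := by simp only [List.length_map]; omega
  have rk : (done ++ p :: rest).getD (done.map tr3).length [] = p := by
    have hlen : (done.map tr3).length < (done ++ p :: rest).length := by simp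
    rw [List.getD_eq_getElem _ _ hlen, List.getElem_append_right (by simp)]
    simp
  have rk1 : (done ++ p :: rest).getD ((done.map tr3).length - 1) [] = done.getD (done.length - 1) [] := by
    rw [List.getD_eq_getElem _ _ (by simp only [List.length_map, List.length_append, List.length_cons]; omega),
        List.getD_eq_getElem _ _ (by omega),
        List.getElem_append_left (by simp only [List.length_map]; omega)]
    simp
  have rk2 : (done ++ p :: rest).getD ((done.map tr3).length - 2) [] = done.getD (done.length - 2) [] := by
    rw [List.getD_eq_getElem _ _ (by simp only [List.length_map, List.length_append, List.length_cons]; omega),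
        List.getD_eq_getElem _ _ (by omega),
        List.getElem_append_left (by simp only [List.length_map]; omega)]
    simp
  rw [g2 _ (by simp only [List.length_map]; omega), g2 _ (by simp only [List.length_map]; omega)]
  simp only [blurPix, gRow, chN, pyR3, if_neg hk, if_neg hk1, rk, rk1, rk2]
  simp [tr3, PySem.List.pyGetD_ofNat']
  refine ⟨by congr 1; ring, by congr 1; ring, by congr 1; ring⟩

theorem head_eq (done : List (List Int)) (p : List Int) (rest : List (List Int)) :
    blurPix (((done ++ [p]).map tr3).drop ((done.length + 1) - 3))
      = gRow (done ++ p :: rest) done.length := by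
  have pyR3 : PySem.List.pyRange 0 3 1 = [0,1,2] := by decide
  rcases done with _ | ⟨a, done'⟩
  · simp [blurPix, gRow, chN, tr3, pyR3, PySem.List.pyGetD_ofNat', List.getD]
  rcases done' with _ | ⟨b, d⟩
  · simp [blurPix, gRow, chN, tr3, pyR3, PySem.List.pyGetD_ofNat', List.getD]
    refine ⟨by congr 1; ring, by congr 1; ring, by congr 1; ring⟩
  · exact head_eq_big (a :: b :: d) p rest (by simp)

theorem blur_go (rest : List (List Int)) : ∀ (done : List (List Int)),
    blurRow ((done.map tr3).drop (done.length - 3)) rest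
      = (List.range' done.length rest.length).map (gRow (done ++ rest)) := by
  induction rest with
  | nil => intro done; simp [blurRow]
  | cons p rest ih =>
    intro done
    rw [blurRow]
    have hw' : ((done.map tr3).drop (done.length - 3) ++ [tr3 p]).drop
          (((done.map tr3).drop (done.length - 3)).length + 1 - 3)
        = ((done ++ [p]).map tr3).drop ((done.length + 1) - 3) := by
      have h := drop_win (done.map tr3) (tr3 p)
      simpa using h
    rw [hw']
    rw [List.length_cons, List.range'_succ, List.map_cons]
    congr 1
    · exact head_eq done p rest
    · have h1 : ((done ++ [p]).map tr3).drop ((done.length + 1) - 3)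
          = ((done ++ [p]).map tr3).drop ((done ++ [p]).length - 3) := by simp
      have h2 : done ++ p :: rest = (done ++ [p]) ++ rest := by simp
      rw [h1, h2]
      have := ih (done ++ [p])
      simpa using this

-- ===== VERDICT (by name: the statement is the Claim_ definition above) =====
theorem difuminado_spec : Claim_equal_difuminado := by
  intro L _ _
  unfold Spec_difuminado difuminado_alt
  rw [A_eq_map]
  apply List.map_congr_left
  intro row _
  have := blur_go row []
  simpa [List.range_eq_range'] using this.symm
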